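-- pv_equiv track=rewrite | github.com/Raphour/Math_SAE | test-machine.py | determine_valuations
-- ===== SOURCE A (Python) =====
-- import copy
--
-- def determine_valuations(list_var):
--     '''Arguments : une liste de booléens informant de valeurs logiques connues (ou None dans le cas contraire) pour un ensemble de variables
--     Renvoie : La liste de toutes les valuations (sans doublon) envisageables pour les variables de list_var
--
-- '''
--     valuations = []
--     indices = [i for i in range(len(list_var)) if list_var[i] == None]
--     for i in range(2**len(indices)):
--         valuation = copy.deepcopy(list_var)
--         for j in range(len(indices)):
--             valuation[indices[j]] = (i // 2**j) % 2 == 1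
--         valuations.append(valuation)
--     return valuations
-- ===== SOURCE B (Python) =====
-- def determine_valuations(list_var):
--     indices = [i for i in range(len(list_var)) if list_var[i] is None]
--     valuations = [list(list_var)]
--     for idx in reversed(indices):
--         next_vals = []
--         for v in valuations:
--             lo = list(v)
--             lo[idx] = False
--             hi = list(v)
--             hi[idx] = True
--             next_vals.append(lo)
--             next_vals.append(hi)
--         valuations = next_vals
--     return valuations
-- ===== Notes on version B (the rewrite author's own statement) =====
-- stated objective: alternative
-- what changed: B builds the valuation list by successive doubling over the unknown positions in reverse (emitting a False and a True copy per current valuation) instead of A's counting loop 0..2^k-1 with floor-division/modulo bit extraction and deepcopy.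
import Mathlib
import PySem

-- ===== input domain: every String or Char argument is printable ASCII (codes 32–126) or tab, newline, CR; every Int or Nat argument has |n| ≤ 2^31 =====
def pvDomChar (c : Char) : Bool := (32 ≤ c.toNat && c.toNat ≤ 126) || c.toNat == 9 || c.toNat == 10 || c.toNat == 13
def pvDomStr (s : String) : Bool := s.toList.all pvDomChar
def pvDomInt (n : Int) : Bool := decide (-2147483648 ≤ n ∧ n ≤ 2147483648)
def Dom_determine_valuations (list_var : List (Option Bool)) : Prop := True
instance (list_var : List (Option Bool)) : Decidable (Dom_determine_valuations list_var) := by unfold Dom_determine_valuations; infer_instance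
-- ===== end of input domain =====

-- B replaces A's 2^k counting loop with bit arithmetic by a list-doubling pass over the
-- unknown positions in reverse (emit False then True copies); alternative decomposition, same output.

-- ===== PORT A =====
-- Python's valuations hold the original values (booleans) plus assigned booleans; every None
-- position is assigned in the inner loop, so the final conversion Option Bool → Bool is exact.
def determine_valuations (list_var : List (Option Bool)) : List (List Bool) :=
  -- indices = [i for i in range(len(list_var)) if list_var[i] == None]
  let indices : List Int :=
    (PySem.List.pyRange 0 (list_var.length : Int) 1).filter
      (fun i => PySem.List.pyGetD list_var i none == none)
  -- for i in range(2**len(indices)): valuation = deepcopy(list_var); inner loop; append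
  let valuations : List (List (Option Bool)) :=
    (PySem.List.pyRange 0 ((2 : Int) ^ indices.length) 1).foldl
      (fun valuations i =>
        let valuation :=
          -- for j in range(len(indices)): valuation[indices[j]] = (i // 2**j) % 2 == 1
          -- j ≥ 0 always, so 2**j is (2:Int)^j.toNat exactly; indices[j] is in range, so
          -- pyGetD/pySetD are exact here.
          (PySem.List.pyRange 0 (indices.length : Int) 1).foldl
            (fun valuation j =>
              PySem.List.pySetD valuation (PySem.List.pyGetD indices j 0)
                (some (PySem.Int.mod (PySem.Int.floordiv i ((2 : Int) ^ j.toNat)) 2 == 1)))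
            list_var
        valuations ++ [valuation])
      []
  valuations.map (fun v => v.map (fun o => o.getD false))

-- ===== PORT B =====
def determine_valuations_alt (list_var : List (Option Bool)) : List (List Bool) :=
  -- indices = [i for i in range(len(list_var)) if list_var[i] is None]
  let indices : List Int :=
    (PySem.List.pyRange 0 (list_var.length : Int) 1).filter
      (fun i => PySem.List.pyGetD list_var i none == none)
  -- valuations = [list(list_var)]; for idx in reversed(indices): double the list
  let valuations : List (List (Option Bool)) :=
    indices.reverse.foldl
      (fun vals idx =>
        vals.flatMap (fun v =>
          [PySem.List.pySetD v idx (some false), PySem.List.pySetD v idx (some true)]))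
      [list_var]
  valuations.map (fun v => v.map (fun o => o.getD false))

-- ===== PRECONDITION & SPEC =====
def Spec_determine_valuations (list_var : List (Option Bool)) (out : List (List Bool)) : Prop := out = determine_valuations_alt list_var
instance (list_var : List (Option Bool)) (out : List (List Bool)) : Decidable (Spec_determine_valuations list_var out) := by unfold Spec_determine_valuations; infer_instance

-- ===== CLAIM (what is proved, stated in full; the proofs are below) =====
def Claim_equal_determine_valuations : Prop := ∀ (list_var : List (Option Bool)), Dom_determine_valuations list_var → Spec_determine_valuations list_var (determine_valuations list_var)

-- ===== LEMMAS AND PROOFS =====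

/-- Filling the positions `ds` with the binary digits of `m` (least significant first). -/
def dvFill : List (Option Bool) → List Int → Nat → List (Option Bool)
  | xs, [], _ => xs
  | xs, d :: ds, m =>
      dvFill (PySem.List.pySetD xs d (some (decide (m % 2 = 1)))) ds (m / 2)

/-- A's inner loop, reduced to Nat counters, computes `dvFill`. -/
theorem dvInnerA (ds : List Int) (xs : List (Option Bool)) (m : Nat) :
    (List.range ds.length).foldl
      (fun val k => PySem.List.pySetD val (PySem.List.pyGetD ds ((k : Nat) : Int) 0)
        (some (decide (m / 2 ^ k % 2 = 1)))) xs = dvFill xs ds m := by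
  induction ds generalizing xs m with
  | nil => simp [dvFill]
  | cons d ds ih =>
      rw [List.length_cons, List.range_succ_eq_map, List.foldl_cons, List.foldl_map]
      have hbody :
          (fun (val : List (Option Bool)) (k : Nat) =>
              PySem.List.pySetD val (PySem.List.pyGetD (d :: ds) ((k.succ : Nat) : Int) 0)
                (some (decide (m / 2 ^ k.succ % 2 = 1)))) =
          (fun (val : List (Option Bool)) (k : Nat) =>
              PySem.List.pySetD val (PySem.List.pyGetD ds ((k : Nat) : Int) 0)
                (some (decide ((m / 2) / 2 ^ k % 2 = 1)))) := by
        funext val k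
        have h1 : PySem.List.pyGetD (d :: ds) ((k.succ : Nat) : Int) 0 =
            PySem.List.pyGetD ds ((k : Nat) : Int) 0 := by
          rw [PySem.List.pyGetD_natCast, PySem.List.pyGetD_natCast, List.getD_cons_succ]
        have h2 : m / 2 ^ k.succ = (m / 2) / 2 ^ k := by
          rw [Nat.pow_succ', Nat.div_div_eq_div_mul]
        rw [h1, h2]
      have hinit :
          PySem.List.pySetD xs (PySem.List.pyGetD (d :: ds) ((0 : Nat) : Int) 0)
            (some (decide (m / 2 ^ 0 % 2 = 1))) =
          PySem.List.pySetD xs d (some (decide (m % 2 = 1))) := by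
        simp only [pow_zero, Nat.div_one, PySem.List.pyGetD_natCast, List.getD_cons_zero]
      rw [hbody, hinit, ih]
      rfl

/-- A's inner loop in its Int form computes `dvFill`. -/
theorem dvInnerA_int (ds : List Int) (xs : List (Option Bool)) (m : Nat) :
    (PySem.List.pyRange 0 (ds.length : Int) 1).foldl
      (fun valuation j =>
        PySem.List.pySetD valuation (PySem.List.pyGetD ds j 0)
          (some (PySem.Int.mod (PySem.Int.floordiv (m : Int) ((2 : Int) ^ j.toNat)) 2 == 1)))
      xs = dvFill xs ds m := by
  rw [PySem.List.pyRange_zero_natCast, List.foldl_map, ← dvInnerA ds xs m]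
  congr 1
  funext val k
  congr 1
  have h1 : PySem.Int.floordiv (m : Int) ((2 : Int) ^ ((k : Int)).toNat) =
      ((m / 2 ^ k : Nat) : Int) := by
    rw [show ((k : Int)).toNat = k by simp,
        show ((2 : Int) ^ k) = ((2 ^ k : Nat) : Int) by push_cast; ring]
    exact PySem.Int.floordiv_natCast m (2 ^ k)
  have h2 : PySem.Int.mod ((m / 2 ^ k : Nat) : Int) 2 = ((m / 2 ^ k % 2 : Nat) : Int) := by
    exact_mod_cast PySem.Int.mod_natCast (m / 2 ^ k) 2
  rw [h1, h2]
  by_cases h : m / 2 ^ k % 2 = 1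
  · simp [h]
  · have h0 : m / 2 ^ k % 2 = 0 := by omega
    rw [h0]
    simp

/-- Setting a position not among `ds` commutes with `dvFill`. -/
theorem dvFill_set_comm (d : Int) (b : Option Bool) (hd : 0 ≤ d) :
    ∀ (ds : List Int) (xs : List (Option Bool)) (m : Nat), d ∉ ds → (∀ e ∈ ds, 0 ≤ e) →
    dvFill (PySem.List.pySetD xs d b) ds m = PySem.List.pySetD (dvFill xs ds m) d b := by
  intro ds
  induction ds with
  | nil => intro xs m _ _; simp [dvFill]
  | cons e ds ih =>
      intro xs m hmem hnn
      have he : 0 ≤ e := hnn e (List.mem_cons_self ..)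
      have hne : d ≠ e := fun h => hmem (h ▸ List.mem_cons_self ..)
      have hcomm : ∀ (v : Option Bool),
          PySem.List.pySetD (PySem.List.pySetD xs d b) e v =
          PySem.List.pySetD (PySem.List.pySetD xs e v) d b := by
        intro v
        rw [PySem.List.pySetD_of_nonneg _ _ hd, PySem.List.pySetD_of_nonneg _ _ he,
            PySem.List.pySetD_of_nonneg _ _ he, PySem.List.pySetD_of_nonneg _ _ hd,
            List.set_comm]
        omega
      show dvFill (PySem.List.pySetD (PySem.List.pySetD xs d b) e _) ds (m / 2) = _
      rw [hcomm, ih _ _ (fun h => hmem (List.mem_cons_of_mem _ h))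
            (fun x hx => hnn x (List.mem_cons_of_mem _ hx))]
      rfl

/-- Doubling a range: `range (2*n)` mapped is the flatMap of even/odd pairs. -/
theorem dvRangeDouble {α : Type} (n : Nat) (g : Nat → α) :
    (List.range (2 * n)).map g =
    (List.range n).flatMap (fun q => [g (2 * q), g (2 * q + 1)]) := by
  induction n with
  | zero => simp
  | succ n ih =>
      have h : 2 * (n + 1) = (2 * n + 1) + 1 := by omega
      rw [h, List.range_succ, List.range_succ, List.map_append, List.map_append,
          List.range_succ, List.flatMap_append, ← ih]
      simp

/-- B's foldr doubling equals the enumeration of all fillings. -/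
theorem dvDoubling :
    ∀ (ds : List Int) (xs : List (Option Bool)), ds.Nodup → (∀ e ∈ ds, 0 ≤ e) →
    ds.foldr
      (fun d acc => acc.flatMap (fun v =>
        [PySem.List.pySetD v d (some false), PySem.List.pySetD v d (some true)])) [xs] =
    (List.range (2 ^ ds.length)).map (fun m => dvFill xs ds m) := by
  intro ds
  induction ds with
  | nil => intro xs _ _; simp [dvFill]
  | cons d ds ih =>
      intro xs hnodup hnn
      have hd : 0 ≤ d := hnn d (List.mem_cons_self ..)
      have hdmem : d ∉ ds := (List.nodup_cons.mp hnodup).1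
      have hnn' : ∀ e ∈ ds, 0 ≤ e := fun e he => hnn e (List.mem_cons_of_mem _ he)
      rw [List.foldr_cons, ih xs (List.nodup_cons.mp hnodup).2 hnn',
          List.length_cons, pow_succ, Nat.mul_comm, dvRangeDouble, List.flatMap_map]
      refine List.flatMap_congr ?_
      intro q hq
      have hfillF : dvFill xs (d :: ds) (2 * q) =
          PySem.List.pySetD (dvFill xs ds q) d (some false) := by
        show dvFill (PySem.List.pySetD xs d (some (decide (2 * q % 2 = 1)))) ds (2 * q / 2) = _
        rw [show (decide (2 * q % 2 = 1)) = false by simp [Nat.mul_mod_right],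
            show 2 * q / 2 = q by omega]
        exact dvFill_set_comm d (some false) hd ds xs q hdmem hnn'
      have hfillT : dvFill xs (d :: ds) (2 * q + 1) =
          PySem.List.pySetD (dvFill xs ds q) d (some true) := by
        show dvFill (PySem.List.pySetD xs d (some (decide ((2 * q + 1) % 2 = 1)))) ds
            ((2 * q + 1) / 2) = _
        rw [show (decide ((2 * q + 1) % 2 = 1)) = true by simp,
            show (2 * q + 1) / 2 = q by omega]
        exact dvFill_set_comm d (some true) hd ds xs q hdmem hnn'
      simp [hfillF, hfillT]

-- ===== VERDICT (by name: the statement is the Claim_ definition above) =====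
theorem determine_valuations_spec : Claim_equal_determine_valuations := by
  intro list_var _
  unfold Spec_determine_valuations
  simp only [determine_valuations, determine_valuations_alt]
  set indices : List Int :=
    (PySem.List.pyRange 0 (list_var.length : Int) 1).filter
      (fun i => PySem.List.pyGetD list_var i none == none) with hI
  have hnn : ∀ e ∈ indices, 0 ≤ e := by
    intro e he
    have := (List.mem_filter.mp (hI ▸ he)).1
    exact ((PySem.List.mem_pyRange_one).mp this).1
  have hnodup : indices.Nodup := by
    rw [hI]; exact (PySem.List.nodup_pyRange_one _ _).filter _
  have hA :
      (PySem.List.pyRange 0 ((2 : Int) ^ indices.length) 1).foldl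
        (fun valuations i =>
          valuations ++
            [(PySem.List.pyRange 0 (indices.length : Int) 1).foldl
              (fun valuation j =>
                PySem.List.pySetD valuation (PySem.List.pyGetD indices j 0)
                  (some (PySem.Int.mod (PySem.Int.floordiv i ((2 : Int) ^ j.toNat)) 2 == 1)))
              list_var]) [] =
      (List.range (2 ^ indices.length)).map (fun m => dvFill list_var indices m) := by
    have hrange : PySem.List.pyRange 0 ((2 : Int) ^ indices.length) 1 =
        (List.range (2 ^ indices.length)).map (fun k => ((k : Nat) : Int)) := by
      rw [show ((2 : Int) ^ indices.length) = ((2 ^ indices.length : Nat) : Int) by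
            push_cast; ring,
          PySem.List.pyRange_zero_natCast]
    rw [PySem.List.foldl_append_singleton_eq_map, List.nil_append, hrange, List.map_map]
    apply List.map_congr_left
    intro m _
    exact dvInnerA_int indices list_var m
  have hB :
      indices.reverse.foldl
        (fun vals idx =>
          vals.flatMap (fun v =>
            [PySem.List.pySetD v idx (some false), PySem.List.pySetD v idx (some true)]))
        [list_var] =
      (List.range (2 ^ indices.length)).map (fun m => dvFill list_var indices m) := by
    rw [List.foldl_reverse]
    exact dvDoubling indices list_var hnodup hnn
  rw [hA, hB]
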